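-- pv_equiv track=rewrite | github.com/ozimmortal/problem_solutions | 1589-maximum-sum-obtained-of-any-permutation/1589-maximum-sum-obtained-of-any-permutation.py | maxSumRangeQuery
-- ===== SOURCE A (Python) =====
-- from typing import List
--
-- def maxSumRangeQuery(nums: List[int], requests: List[List[int]]) -> int:
--
--     dif = [0] * (len(nums) + 1)
--
--     for l , r in requests:
--         dif[l] += 1
--         dif[r + 1] -= 1
--
--     prefix = [dif[0]]
--
--     for i in range(1, len(nums)):
--         prefix.append(prefix[i - 1] + dif[i])
--
--     ans = 0
--     prefix.sort()
--     nums.sort()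
--     for i in range(len(nums)):
--         ans += prefix[i] * nums[i]
--
--     return ans % (10 ** 9 + 7)
-- ===== SOURCE B (Python) =====
-- from typing import List
--
-- # B: per-index coverage counting (no difference array / running prefix); like A, sorts nums in place.
-- def maxSumRangeQuery(nums: List[int], requests: List[List[int]]) -> int:
--     counts = sorted(sum(1 for l, r in requests if l <= i <= r) for i in range(len(nums)))
--     nums.sort()
--     return sum(c * v for c, v in zip(counts, nums)) % (10 ** 9 + 7)
-- ===== Notes on version B (the rewrite author's own statement) =====
-- stated objective: simpler
-- what changed: Replaces the difference array plus running prefix-sum accumulation with a direct per-index coverage count (counting for each position how many requests contain it) and a zip of the two sorted lists; same in-place nums.sort().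
-- outside the precondition, e.g. on maxSumRangeQuery([1, 2, 3], [[2, 0]]): A returns 1000000006, B returns 0; on maxSumRangeQuery([1, 2], [[-1, 1]]): A returns 0, B returns 3
import Mathlib
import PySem

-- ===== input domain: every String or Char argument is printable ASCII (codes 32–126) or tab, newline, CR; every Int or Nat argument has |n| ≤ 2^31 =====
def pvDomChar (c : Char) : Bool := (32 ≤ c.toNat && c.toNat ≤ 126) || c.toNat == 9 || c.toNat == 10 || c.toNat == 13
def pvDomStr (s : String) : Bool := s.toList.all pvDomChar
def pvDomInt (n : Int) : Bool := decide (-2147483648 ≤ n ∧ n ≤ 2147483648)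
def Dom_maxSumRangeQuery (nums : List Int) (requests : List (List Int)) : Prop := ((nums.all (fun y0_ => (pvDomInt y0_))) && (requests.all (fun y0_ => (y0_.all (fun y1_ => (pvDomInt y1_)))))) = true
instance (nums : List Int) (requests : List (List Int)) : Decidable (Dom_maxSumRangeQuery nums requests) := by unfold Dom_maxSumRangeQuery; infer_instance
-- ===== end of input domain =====

-- B replaces A's difference array + running prefix-sum with a direct per-index coverage count
-- and a zip of the two sorted lists (objective: simpler); like A, the Python B sorts `nums` in
-- place — the theorems below are about the return value.

-- ===== PORT A =====
-- dif[l] += 1; dif[r+1] -= 1  (Python semantics: pySetD/pyGetD; malformed requests raise in Python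
-- and are excluded by Pre_, the match default is never reached there)
def pvStepA (d : List Int) (req : List Int) : List Int :=
  match req with
  | [l, r] =>
      let d1 := PySem.List.pySetD d l (PySem.List.pyGetD d l 0 + 1)
      PySem.List.pySetD d1 (r + 1) (PySem.List.pyGetD d1 (r + 1) 0 - 1)
  | _ => d

def maxSumRangeQuery (nums : List Int) (requests : List (List Int)) : Int :=
  let dif : List Int := requests.foldl pvStepA (List.replicate (nums.length + 1) 0)
  let pre_ : List Int := (PySem.List.pyRange 1 (nums.length : Int)).foldl
      (fun p i => p ++ [PySem.List.pyGetD p (i - 1) 0 + PySem.List.pyGetD dif i 0])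
      [PySem.List.pyGetD dif 0 0]
  let prefixS := PySem.List.sorted pre_ (fun x => x) false
  let numsS := PySem.List.sorted nums (fun x => x) false
  let ans := (PySem.List.pyRange 0 (nums.length : Int)).foldl
      (fun a i => a + PySem.List.pyGetD prefixS i 0 * PySem.List.pyGetD numsS i 0) 0
  PySem.Int.mod ans (10 ^ 9 + 7)

-- ===== PORT B =====
-- the generator condition 'l <= i <= r' (unpack raises on malformed requests, excluded by Pre_)
def pvCovers (i : Int) (req : List Int) : Bool :=
  match req with
  | [l, r] => decide (l ≤ i) && decide (i ≤ r)
  | _ => false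

-- sum(1 for l, r in requests if l <= i <= r)
def pvCount (requests : List (List Int)) (i : Int) : Int :=
  requests.foldl (fun acc req => if pvCovers i req then acc + 1 else acc) 0

def maxSumRangeQuery_alt (nums : List Int) (requests : List (List Int)) : Int :=
  let counts := PySem.List.sorted
      ((PySem.List.pyRange 0 (nums.length : Int)).map (pvCount requests)) (fun x => x) false
  let numsS := PySem.List.sorted nums (fun x => x) false
  PySem.Int.mod ((counts.zip numsS).foldl (fun a cv => a + cv.1 * cv.2) 0) (10 ^ 9 + 7)

-- ===== PRECONDITION & SPEC =====
def pvOkReq (n : Int) (req : List Int) : Bool :=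
  match req with
  | [l, r] => decide (0 ≤ l) && decide (l - 1 ≤ r) && decide (r < n)
  | _ => false

-- Pre_ restricts to the natural domain of range queries: every request is a pair [l, r] with
-- 0 ≤ l, l - 1 ≤ r < len(nums) (possibly-empty ranges included); outside it A raises
-- (ValueError/IndexError) or returns a value only via Python negative-index wraparound or a
-- reversed range, behaviour outside the function's purpose.
def Pre_maxSumRangeQuery (nums : List Int) (requests : List (List Int)) : Prop :=
  ∀ req ∈ requests, pvOkReq (nums.length : Int) req = true

instance (nums : List Int) (requests : List (List Int)) : Decidable (Pre_maxSumRangeQuery nums requests) := by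
  unfold Pre_maxSumRangeQuery; infer_instance

def pvWitness_maxSumRangeQuery : List Int × List (List Int) := ([3, -2, 5], [[0, 1], [1, 2]])

def Spec_maxSumRangeQuery (nums : List Int) (requests : List (List Int)) (out : Int) : Prop := out = maxSumRangeQuery_alt nums requests
instance (nums : List Int) (requests : List (List Int)) (out : Int) : Decidable (Spec_maxSumRangeQuery nums requests out) := by unfold Spec_maxSumRangeQuery; infer_instance

-- ===== CLAIM (what is proved, stated in full; the proofs are below) =====
def Claim_equal_maxSumRangeQuery : Prop := ∀ (nums : List Int) (requests : List (List Int)), Dom_maxSumRangeQuery nums requests → Pre_maxSumRangeQuery nums requests → Spec_maxSumRangeQuery nums requests (maxSumRangeQuery nums requests)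

-- ===== LEMMAS AND PROOFS =====

-- pyGetD at a nonnegative in-range index, in getD form
lemma pv_pyGetD_toNat (xs : List Int) (i : Int) (h0 : 0 ≤ i) (h1 : i < (xs.length : Int)) :
    PySem.List.pyGetD xs i 0 = xs.getD i.toNat 0 := by
  rw [PySem.List.pyGetD_eq_getElem xs 0 h0 h1, List.getD_eq_getElem xs 0 (by omega)]

-- summing a prefix of a list after overwriting position p
lemma pv_sum_take_set (d : List Int) (p i : Nat) (v : Int) (hp : p < d.length) :
    ((d.set p v).take (i + 1)).sum
      = (d.take (i + 1)).sum + if p ≤ i then v - d.getD p 0 else 0 := by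
  induction d generalizing p i with
  | nil => simp at hp
  | cons x t ih =>
    cases p with
    | zero => simp; ring
    | succ p' =>
      cases i with
      | zero => simp
      | succ i' =>
        have hp' : p' < t.length := by simpa using hp
        simp only [List.set_cons_succ, List.take_succ_cons, List.sum_cons, List.getD_cons_succ,
          ih p' i' hp']
        split_ifs with h1 h2 h2 <;> omega

-- pvStepA keeps the length of the difference array
lemma pv_foldl_stepA_length (reqs : List (List Int)) (d : List Int) :
    (reqs.foldl pvStepA d).length = d.length := by
  induction reqs generalizing d with
  | nil => rfl
  | cons req reqs ih =>
    rw [List.foldl_cons, ih]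
    cases req with
    | nil => rfl
    | cons a t =>
      cases t with
      | nil => rfl
      | cons b t' =>
        cases t' with
        | nil => simp [pvStepA, PySem.List.length_pySetD]
        | cons c t'' => rfl

-- the difference array's prefix sums count the covering requests
lemma pv_dif_sum (reqs : List (List Int)) (d : List Int) (n : Nat)
    (hlen : d.length = n + 1)
    (hok : ∀ req ∈ reqs, pvOkReq (n : Int) req = true) (i : Nat) :
    ((reqs.foldl pvStepA d).take (i + 1)).sum
      = (d.take (i + 1)).sum + (reqs.countP (pvCovers (i : Int)) : Int) := by
  induction reqs generalizing d with
  | nil => simp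
  | cons req reqs ih =>
    have hokr : pvOkReq (n : Int) req = true := hok req (List.mem_cons_self ..)
    obtain ⟨l, r, rfl, h0, hlr, hrn⟩ : ∃ l r, req = [l, r] ∧ 0 ≤ l ∧ l - 1 ≤ r ∧ r < (n : Int) := by
      match req, hokr with
      | [l, r], h =>
        have h' := h
        simp only [pvOkReq, Bool.and_eq_true, decide_eq_true_eq] at h'
        exact ⟨l, r, rfl, h'.1.1, h'.1.2, h'.2⟩
    have e1 : PySem.List.pySetD d l (PySem.List.pyGetD d l 0 + 1)
        = d.set l.toNat (PySem.List.pyGetD d l 0 + 1) := PySem.List.pySetD_of_nonneg _ _ h0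
    have hstep : pvStepA d [l, r]
        = (d.set l.toNat (PySem.List.pyGetD d l 0 + 1)).set (r + 1).toNat
            (PySem.List.pyGetD (d.set l.toNat (PySem.List.pyGetD d l 0 + 1)) (r + 1) 0 - 1) := by
      simp only [pvStepA, e1, PySem.List.pySetD_of_nonneg _ _ (show (0:Int) ≤ r + 1 by omega)]
    rw [List.foldl_cons, List.countP_cons,
      ih (pvStepA d [l, r]) (by rw [hstep]; simp [hlen]) (fun q hq => hok q (List.mem_cons_of_mem _ hq)),
      hstep, pv_sum_take_set _ _ _ _ (by simp [hlen]; omega),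
      pv_sum_take_set _ _ _ _ (by omega),
      pv_pyGetD_toNat d l h0 (by omega),
      pv_pyGetD_toNat _ (r+1) (by omega) (by simp [hlen]; omega)]
    simp only [pvCovers, Bool.and_eq_true, decide_eq_true_eq]
    have h1 : (l.toNat ≤ i) ↔ l ≤ (i : Int) := by omega
    have h2 : ((r + 1).toNat ≤ i) ↔ ¬ ((i : Int) ≤ r) := by omega
    split_ifs <;> omega

-- the prefix-building loop produces the list of prefix sums of dif
lemma pv_prefix_build (dif : List Int) (n : Nat) (hlen : dif.length = n + 1) (m : Nat)
    (h1 : 1 ≤ m) (hm : m ≤ n) :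
    (PySem.List.pyRange 1 (m : Int)).foldl
        (fun p i => p ++ [PySem.List.pyGetD p (i - 1) 0 + PySem.List.pyGetD dif i 0])
        [PySem.List.pyGetD dif 0 0]
      = (List.range m).map (fun k => (dif.take (k + 1)).sum) := by
  induction m with
  | zero => omega
  | succ m ih =>
    rcases Nat.lt_or_ge m 1 with hm1 | hm1
    · interval_cases m
      rw [Nat.cast_one, PySem.List.pyRange_one_eq_nil le_rfl]
      rcases dif with _ | ⟨x, t⟩
      · simp at hlen
      · simp [PySem.List.pyGetD_zero_cons]
    · have hcast : ((m + 1 : Nat) : Int) = (m : Int) + 1 := by push_cast; ring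
      rw [hcast, PySem.List.pyRange_one_succ_right (by exact_mod_cast hm1),
        List.foldl_append, ih hm1 (by omega), List.foldl_cons, List.foldl_nil,
        List.range_succ, List.map_append]
      congr 1
      have hms : (m : Int) - 1 = ((m - 1 : Nat) : Int) := by omega
      rw [hms, PySem.List.pyGetD_natCast, PySem.List.pyGetD_natCast,
        PySem.List.getD_map_range _ _ _ _ (by omega), Nat.sub_add_cancel hm1,
        List.getD_eq_getElem dif 0 (by omega), List.map_singleton,
        List.sum_take_succ dif m (by omega)]

-- index-summation over two equal-length lists equals the zip fold
lemma pv_index_zip (xs ys : List Int) (n : Nat) (hx : xs.length = n) (hy : ys.length = n) :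
    (PySem.List.pyRange 0 (n : Int)).foldl
        (fun a i => a + PySem.List.pyGetD xs i 0 * PySem.List.pyGetD ys i 0) 0
      = (xs.zip ys).foldl (fun a cv => a + cv.1 * cv.2) 0 := by
  have hl : (PySem.List.pyRange 0 (n : Int)).map
        (fun i => PySem.List.pyGetD xs i 0 * PySem.List.pyGetD ys i 0)
      = (xs.zip ys).map (fun cv => cv.1 * cv.2) := by
    apply List.ext_getElem
    · simp [PySem.List.pyRange_zero_nat, hx, hy]
    · intro k hk1 hk2
      have hk : k < n := by simpa [PySem.List.pyRange_zero_nat] using hk1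
      simp only [PySem.List.pyRange_zero_nat, List.map_map, List.getElem_map,
        List.getElem_range, Function.comp_apply, List.getElem_zip]
      rw [PySem.List.pyGetD_natCast, PySem.List.pyGetD_natCast,
        List.getD_eq_getElem xs 0 (by omega), List.getD_eq_getElem ys 0 (by omega)]
  rw [PySem.List.foldl_add, PySem.List.foldl_add, hl]

-- pvCount is a countP
lemma pv_count_eq (reqs : List (List Int)) (i : Int) :
    pvCount reqs i = (reqs.countP (pvCovers i) : Int) := by
  unfold pvCount
  rw [PySem.List.foldl_count_if]
  ring

-- ===== VERDICT (by name: the statement is the Claim_ definition above) =====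
theorem maxSumRangeQuery_spec : Claim_equal_maxSumRangeQuery := by
  intro nums requests _hdom hpre
  unfold Spec_maxSumRangeQuery
  simp only [maxSumRangeQuery, maxSumRangeQuery_alt]
  by_cases hn0 : nums.length = 0
  · rw [hn0]
    rw [show ((0:Nat) : Int) = 0 from rfl,
      PySem.List.pyRange_one_eq_nil (le_refl (0:Int)), List.foldl_nil, List.map_nil]
    have : PySem.List.sorted ([] : List Int) (fun x => x) false = [] := rfl
    rw [this, List.zip_nil_left, List.foldl_nil]
  · have hlen_dif : (requests.foldl pvStepA (List.replicate (nums.length + 1) (0:Int))).length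
        = nums.length + 1 := by
      rw [pv_foldl_stepA_length]; simp
    have hprefix : (PySem.List.pyRange 1 (nums.length : Int)).foldl
          (fun p i => p ++ [PySem.List.pyGetD p (i - 1) 0
            + PySem.List.pyGetD (requests.foldl pvStepA (List.replicate (nums.length + 1) 0)) i 0])
          [PySem.List.pyGetD (requests.foldl pvStepA (List.replicate (nums.length + 1) 0)) 0 0]
        = (PySem.List.pyRange 0 (nums.length : Int)).map (pvCount requests) := by
      rw [pv_prefix_build _ nums.length hlen_dif nums.length (by omega) le_rfl,
        PySem.List.pyRange_zero_nat, List.map_map]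
      apply List.map_congr_left
      intro k hk
      have hk' : k < nums.length := List.mem_range.mp hk
      rw [pv_dif_sum requests _ nums.length (by simp) hpre k,
        Function.comp_apply, pv_count_eq]
      simp [List.take_replicate]
    rw [hprefix]
    have hx : (PySem.List.sorted ((PySem.List.pyRange 0 (nums.length : Int)).map
        (pvCount requests)) (fun x => x) false).length = nums.length := by
      simp [PySem.List.length_sorted, PySem.List.pyRange_zero_nat]
    have hy : (PySem.List.sorted nums (fun x => x) false).length = nums.length := by
      simp [PySem.List.length_sorted]
    rw [pv_index_zip _ _ nums.length hx hy]
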